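-- pv_equiv track=rewrite | github.com/yididiabera/tokenization | wordLevel_tokenizer.py | wordLevel_tokenizer
-- ===== SOURCE A (Python) =====
-- def wordLevel_tokenizer(text):
--     " Tokenizes text into words, handles punctuation, and splits contractions."
--     # adding space before apostrophes to split contractions
--     text = text.replace("'", " '")
--
--     # adding spaces around punctuation
--     punctuations = ".,!?()"
--     for p in punctuations:
--         text = text.replace(p, f" {p} ")
--
--     # replacing multiple spaces with a single space
--     text = text.split()
--     text = ' '.join(text)
--
--     # splitting into tokens
--     tokens = text.strip().split()
--
--     return tokens
-- ===== SOURCE B (Python) =====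
-- def wordLevel_tokenizer(text):
--     "Tokenizes text into words, handles punctuation, and splits contractions."
--     punctuations = ".,!?()"
--     tokens = []
--     buf = ""
--     for ch in text:
--         if ch.isspace():
--             if buf:
--                 tokens.append(buf)
--             buf = ""
--         elif ch in punctuations:
--             if buf:
--                 tokens.append(buf)
--             tokens.append(ch)
--             buf = ""
--         elif ch == "'":
--             if buf:
--                 tokens.append(buf)
--             buf = "'"
--         else:
--             buf += ch
--     if buf:
--         tokens.append(buf)
--     return tokens
-- ===== Notes on version B (the rewrite author's own statement) =====
-- stated objective: alternative
-- what changed: Replaces A's seven whole-string replace passes plus split/join/strip/split with a single left-to-right character scan that maintains a current-token buffer and flushes it on whitespace, punctuation and apostrophes; asymptotically one pass, though CPython's C-level str.replace makes A faster in wall-clock terms.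
import Mathlib
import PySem

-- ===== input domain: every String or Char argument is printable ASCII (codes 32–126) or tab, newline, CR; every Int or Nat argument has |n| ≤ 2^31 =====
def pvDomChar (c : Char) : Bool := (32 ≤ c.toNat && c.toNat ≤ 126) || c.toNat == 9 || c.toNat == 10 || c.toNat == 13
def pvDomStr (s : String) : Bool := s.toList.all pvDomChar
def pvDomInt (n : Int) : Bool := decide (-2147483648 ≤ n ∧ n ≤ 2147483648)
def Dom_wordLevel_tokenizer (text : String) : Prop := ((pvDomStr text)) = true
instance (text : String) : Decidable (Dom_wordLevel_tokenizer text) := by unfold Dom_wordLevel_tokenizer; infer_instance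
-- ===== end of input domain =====

-- B replaces A's seven whole-string replace passes plus split/join/strip/split by a single
-- left-to-right character scan with a current-token buffer (objective: alternative, one pass).

-- ===== PORT A =====
def wordLevel_tokenizer (text : String) : List String :=
  -- text = text.replace("'", " '")
  let t1 := PySem.Str.replace text "'" " '"
  -- for p in ".,!?()": text = text.replace(p, f" {p} ")
  let t2 := ".,!?()".toList.foldl
    (fun t p => PySem.Str.replace t (String.ofList [p]) (String.ofList [' ', p, ' '])) t1
  -- text = ' '.join(text.split())
  let parts := PySem.Str.split₀ t2
  let t3 := PySem.Str.join " " parts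
  -- tokens = text.strip().split()
  PySem.Str.split₀ (PySem.Str.strip t3)

-- ===== PORT B =====
-- if buf: tokens.append(buf)
def wltFlush (tokens : List String) (buf : List Char) : List String :=
  if buf.isEmpty then tokens else tokens ++ [String.ofList buf]

-- the body of B's for-loop over the characters of text
def wltStep (s : List String × List Char) (ch : Char) : List String × List Char :=
  if PySem.Chars.isspace ch then (wltFlush s.1 s.2, [])
  else if ch ∈ ".,!?()".toList then (wltFlush s.1 s.2 ++ [String.ofList [ch]], [])
  else if ch = '\'' then (wltFlush s.1 s.2, ['\''])
  else (s.1, s.2 ++ [ch])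

def wordLevel_tokenizer_alt (text : String) : List String :=
  let s := text.toList.foldl wltStep ([], [])
  wltFlush s.1 s.2

-- ===== PRECONDITION & SPEC =====
def Spec_wordLevel_tokenizer (text : String) (out : List String) : Prop := out = wordLevel_tokenizer_alt text
instance (text : String) (out : List String) : Decidable (Spec_wordLevel_tokenizer text out) := by unfold Spec_wordLevel_tokenizer; infer_instance

-- ===== CLAIM (what is proved, stated in full; the proofs are below) =====
def Claim_equal_wordLevel_tokenizer : Prop := ∀ (text : String), Dom_wordLevel_tokenizer text → Spec_wordLevel_tokenizer text (wordLevel_tokenizer text)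

-- ===== LEMMAS AND PROOFS =====
def pvPb (d : Char) : Bool := !PySem.Chars.isspace d
def pvWords (cs : List Char) : List (List Char) :=
  match cs with
  | [] => []
  | c :: t =>
    if PySem.Chars.isspace c then pvWords t
    else (c :: t.takeWhile pvPb) :: pvWords (t.dropWhile pvPb)
termination_by cs.length
decreasing_by
  · simp
  · have := t.length_dropWhile_le pvPb; simp; omega

theorem pv_split₀_go (l : List Char) : ∀ (cur : List Char) (acc : List (List Char)),
    PySem.Chars.split₀.go l cur acc = acc.reverse ++
      (if cur = [] then pvWords l
       else (cur.reverse ++ l.takeWhile pvPb) :: pvWords (l.dropWhile pvPb)) := by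
  induction l with
  | nil =>
    intro cur acc
    by_cases hc : cur = [] <;>
      simp [PySem.Chars.split₀.go, hc, pvWords]
  | cons c t ih =>
    intro cur acc
    by_cases hs : PySem.Chars.isspace c
    · by_cases hc : cur = []
      · subst hc
        simp [PySem.Chars.split₀.go, hs, ih, pvWords]
      · simp [PySem.Chars.split₀.go, hs, hc, ih, pvWords, List.takeWhile, List.dropWhile, pvPb]
    · have hP : pvPb c = true := by simp [pvPb, hs]
      by_cases hc : cur = [] <;>
        simp [PySem.Chars.split₀.go, hs, hc, ih, pvWords, List.takeWhile_cons, List.dropWhile_cons, hP]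

theorem pv_split₀_eq (cs : List Char) : PySem.Chars.split₀ cs = pvWords cs := by
  simp [PySem.Chars.split₀, pv_split₀_go]

theorem pv_replace_go (a : Char) (new : List Char) (l : List Char) :
    ∀ (fuel : Nat) (acc : List Char), l.length ≤ fuel →
    PySem.Chars.replace.go [a] new fuel l acc
      = acc.reverse ++ l.flatMap (fun c => if c = a then new else [c]) := by
  induction l with
  | nil => intro fuel acc h; cases fuel <;> simp [PySem.Chars.replace.go]
  | cons c t ih =>
    intro fuel acc h
    cases fuel with
    | zero => simp at h
    | succ fuel =>
      by_cases hca : c = a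
      · subst hca
        have hpre : List.isPrefixOf [c] (c :: t) = true := by simp [List.isPrefixOf]
        simp only [PySem.Chars.replace.go, hpre, if_pos, List.length_cons, List.length_nil,
          List.drop_succ_cons, List.drop_zero]
        rw [ih fuel _ (by simpa using Nat.le_of_succ_le_succ h)]
        simp
      · have hpre : List.isPrefixOf [c] (c :: t) = true := by simp [List.isPrefixOf]
        have hpre' : List.isPrefixOf [a] (c :: t) = false := by
          simp [List.isPrefixOf]; exact fun h' => absurd h'.symm hca
        simp only [PySem.Chars.replace.go, hpre', Bool.false_eq_true, if_neg, if_false]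
        rw [ih fuel _ (by simpa using Nat.le_of_succ_le_succ h)]
        simp [hca]

theorem pv_replace_single (a : Char) (new cs : List Char) :
    PySem.Chars.replace cs [a] new = cs.flatMap (fun c => if c = a then new else [c]) := by
  simp [PySem.Chars.replace, pv_replace_go a new cs cs.length [] (le_refl _)]

theorem pv_words_spacefree (buf : List Char) (h : ∀ c ∈ buf, PySem.Chars.isspace c = false) :
    pvWords buf = if buf.isEmpty then [] else [buf] := by
  cases buf with
  | nil => simp [pvWords]
  | cons b bt =>
    have hb : PySem.Chars.isspace b = false := h b (by simp)
    have ht : ∀ c ∈ bt, pvPb c = true := fun c hc => by simp [pvPb, h c (List.mem_cons_of_mem _ hc)]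
    rw [pvWords]
    simp [hb, List.takeWhile_eq_self_iff.mpr ht, List.dropWhile_eq_nil_iff.mpr (fun c hc => ht c hc), pvWords]

theorem pv_words_flush (buf : List Char) (c : Char) (z : List Char)
    (h : ∀ d ∈ buf, PySem.Chars.isspace d = false) (hc : PySem.Chars.isspace c = true) :
    pvWords (buf ++ c :: z) = (if buf.isEmpty then [] else [buf]) ++ pvWords z := by
  cases buf with
  | nil => simp [pvWords, hc]
  | cons b bt =>
    have hb : PySem.Chars.isspace b = false := h b (by simp)
    have ht : ∀ d ∈ bt, pvPb d = true := fun d hd => by simp [pvPb, h d (List.mem_cons_of_mem _ hd)]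
    rw [List.cons_append, pvWords]
    simp only [hb, Bool.false_eq_true, if_false]
    rw [List.takeWhile_append_of_pos ht, List.dropWhile_append_of_pos ht]
    have hcP : pvPb c = false := by simp [pvPb, hc]
    simp [List.takeWhile_cons, List.dropWhile_cons, hcP, pvWords, hc]

theorem pv_words_allspace (ws : List Char) (h : ∀ c ∈ ws, PySem.Chars.isspace c = true) :
    pvWords ws = [] := by
  induction ws with
  | nil => simp [pvWords]
  | cons c t ih =>
    rw [pvWords]
    simp [h c (by simp), ih (fun d hd => h d (List.mem_cons_of_mem _ hd))]

theorem pv_words_append_allspace (x ws : List Char) (h : ∀ c ∈ ws, PySem.Chars.isspace c = true) :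
    pvWords (x ++ ws) = pvWords x := by
  induction x using pvWords.induct with
  | case1 => rw [List.nil_append, pv_words_allspace ws h]; simp [pvWords]
  | case2 c t hs ih =>
    rw [List.cons_append, pvWords, pvWords]
    simp only [hs, if_true, ih]
  | case3 c t hs ih =>
    rw [List.cons_append, pvWords, pvWords]
    simp only [hs, Bool.false_eq_true, if_false]
    have hws : ws.takeWhile pvPb = [] := by
      cases ws with
      | nil => rfl
      | cons w wt => simp [List.takeWhile_cons, pvPb, h w (by simp)]
    have hwsd : ws.dropWhile pvPb = ws := by
      cases ws with
      | nil => rfl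
      | cons w wt => simp [List.dropWhile_cons, pvPb, h w (by simp)]
    by_cases hall : ∀ d ∈ t, pvPb d = true
    · rw [List.takeWhile_append_of_pos hall, List.dropWhile_append_of_pos hall, hws, hwsd,
        List.takeWhile_eq_self_iff.mpr hall, List.dropWhile_eq_nil_iff.mpr (fun d hd => hall d hd),
        pv_words_allspace ws h]
      simp [pvWords]
    · have hlen : ¬ ((t.takeWhile pvPb).length = t.length) := by
        intro hc
        exact hall (List.takeWhile_eq_self_iff.mp ((t.takeWhile_prefix (p := pvPb)).eq_of_length hc))
      have hne : ¬ ((t.dropWhile pvPb).isEmpty = true) := by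
        simp only [List.isEmpty_iff, List.dropWhile_eq_nil_iff]
        exact fun hc => hall hc
      rw [List.takeWhile_append, if_neg hlen, List.dropWhile_append, if_neg hne, ih]

theorem pv_words_strip (x : List Char) : pvWords (PySem.Chars.strip x) = pvWords x := by
  have lstrip_eq : pvWords (PySem.Chars.lstrip x) = pvWords x := by
    unfold PySem.Chars.lstrip
    induction x with
    | nil => rfl
    | cons c t ih =>
      by_cases hs : PySem.Chars.isspace c
      · rw [List.dropWhile_cons_of_pos hs, ih, pvWords]; simp [hs]
      · rw [List.dropWhile_cons_of_neg (by simp [hs])]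
  rw [PySem.Chars.strip, ← lstrip_eq]
  set y := PySem.Chars.lstrip x with hy
  have hdecomp : y = PySem.Chars.rstrip y ++ (y.reverse.takeWhile PySem.Chars.isspace).reverse := by
    unfold PySem.Chars.rstrip
    rw [← List.reverse_append, List.takeWhile_append_dropWhile, List.reverse_reverse]
  conv_rhs => rw [hdecomp]
  rw [pv_words_append_allspace]
  intro c hc
  rw [List.mem_reverse] at hc
  exact List.mem_takeWhile_imp hc

theorem pv_words_mem (cs : List Char) : ∀ w ∈ pvWords cs, w ≠ [] ∧ ∀ c ∈ w, PySem.Chars.isspace c = false := by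
  induction cs using pvWords.induct with
  | case1 => simp [pvWords]
  | case2 c t hs ih => rw [pvWords]; simpa [hs] using ih
  | case3 c t hs ih =>
    rw [pvWords]
    simp only [hs, Bool.false_eq_true, if_false, List.mem_cons]
    rintro w (rfl | hw)
    · refine ⟨by simp, ?_⟩
      intro d hd
      rcases List.mem_cons.mp hd with rfl | hd
      · simpa using hs
      · have := List.mem_takeWhile_imp hd
        simpa [pvPb] using this
    · exact ih w hw

theorem pv_words_join (parts : List (List Char))
    (h : ∀ w ∈ parts, w ≠ [] ∧ ∀ c ∈ w, PySem.Chars.isspace c = false) :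
    pvWords (PySem.Chars.join [' '] parts) = parts := by
  induction parts with
  | nil => simp [PySem.Chars.join_nil, pvWords]
  | cons p rest ih =>
    cases rest with
    | nil =>
      rw [PySem.Chars.join_singleton, pv_words_spacefree p (h p (by simp)).2]
      simp [(h p (by simp)).1]
    | cons q r =>
      rw [PySem.Chars.join_cons_cons, List.append_assoc, List.singleton_append]
      rw [pv_words_flush p ' ' _ (h p (by simp)).2 (by decide)]
      rw [ih (fun w hw => h w (List.mem_cons_of_mem _ hw))]
      simp [(h p (by simp)).1]

def pvF (c : Char) : List Char :=
  if c = '\'' then [' ', '\'']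
  else if c = '.' ∨ c = ',' ∨ c = '!' ∨ c = '?' ∨ c = '(' ∨ c = ')' then [' ', c, ' ']
  else [c]

theorem pv_chain (cs : List Char) :
    PySem.Chars.replace (PySem.Chars.replace (PySem.Chars.replace (PySem.Chars.replace
      (PySem.Chars.replace (PySem.Chars.replace (PySem.Chars.replace cs ['\''] [' ', '\''])
        ['.'] [' ', '.', ' ']) [','] [' ', ',', ' ']) ['!'] [' ', '!', ' '])
        ['?'] [' ', '?', ' ']) ['('] [' ', '(', ' ']) [')'] [' ', ')', ' ']
      = cs.flatMap pvF := by
  simp only [pv_replace_single, List.flatMap_assoc]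
  refine congrArg cs.flatMap (funext fun c => ?_)
  by_cases h1 : c = '\''; · subst h1; decide
  by_cases h2 : c = '.'; · subst h2; decide
  by_cases h3 : c = ','; · subst h3; decide
  by_cases h4 : c = '!'; · subst h4; decide
  by_cases h5 : c = '?'; · subst h5; decide
  by_cases h6 : c = '('; · subst h6; decide
  by_cases h7 : c = ')'; · subst h7; decide
  simp [pvF, h1, h2, h3, h4, h5, h6, h7]

theorem pv_split₀_str (s : String) :
    PySem.Str.split₀ s = (pvWords s.toList).map String.ofList := by
  rw [PySem.Str.split₀, pv_split₀_eq]

theorem pv_A_eq (text : String) :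
    wordLevel_tokenizer text = (pvWords (text.toList.flatMap pvF)).map String.ofList := by
  unfold wordLevel_tokenizer
  simp only [show ".,!?()".toList = ['.', ',', '!', '?', '(', ')'] from by decide,
    List.foldl_cons, List.foldl_nil]
  rw [pv_split₀_str, PySem.Str.toList_strip, pv_words_strip, PySem.Str.toList_join]
  rw [pv_split₀_str]
  rw [show " ".toList = [' '] from by decide]
  rw [List.map_map, show (String.toList ∘ String.ofList) = id from funext fun l => by simp,
    List.map_id]
  rw [pv_words_join _ (pv_words_mem _)]
  simp only [PySem.Str.toList_replace, String.toList_ofList,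
    show "'".toList = ['\''] from by decide, show " '".toList = [' ', '\''] from by decide]
  rw [pv_chain]

theorem pv_flush_eq (acc : List String) (buf : List Char) :
    wltFlush acc buf = acc ++ ((if buf.isEmpty then [] else [buf]).map String.ofList) := by
  unfold wltFlush; split <;> simp

theorem pv_words_punct (ch : Char) (tail : List Char) (h : PySem.Chars.isspace ch = false) :
    pvWords (ch :: ' ' :: tail) = [ch] :: pvWords tail := by
  rw [pvWords]
  simp only [h, Bool.false_eq_true, if_false, List.takeWhile_cons, List.dropWhile_cons,
    show pvPb ' ' = false from by decide, Bool.false_eq_true, if_false]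
  rw [pvWords]
  simp [show PySem.Chars.isspace ' ' = true from by decide]

theorem pv_pvF_space (ch : Char) (hs : PySem.Chars.isspace ch = true) : pvF ch = [ch] := by
  unfold pvF
  rw [if_neg, if_neg]
  · rintro (rfl | rfl | rfl | rfl | rfl | rfl) <;> exact absurd hs (by decide)
  · rintro rfl; exact absurd hs (by decide)

theorem pv_pvF_punct (ch : Char) (hm : ch ∈ ['.', ',', '!', '?', '(', ')']) :
    pvF ch = [' ', ch, ' '] := by
  unfold pvF
  rw [if_neg, if_pos]
  · simpa using hm
  · rintro rfl; exact absurd hm (by decide)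

theorem pv_pvF_plain (ch : Char) (h1 : ch ≠ '\'') (h2 : ch ∉ ['.', ',', '!', '?', '(', ')']) :
    pvF ch = [ch] := by
  unfold pvF
  rw [if_neg h1, if_neg]
  simpa using h2

theorem pv_scan (cs : List Char) : ∀ (acc : List String) (buf : List Char),
    (∀ c ∈ buf, PySem.Chars.isspace c = false) →
    (wltFlush (cs.foldl wltStep (acc, buf)).1 (cs.foldl wltStep (acc, buf)).2)
      = acc ++ (pvWords (buf ++ cs.flatMap pvF)).map String.ofList := by
  induction cs with
  | nil =>
    intro acc buf h
    simp only [List.foldl_nil, List.flatMap_nil, List.append_nil]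
    rw [pv_flush_eq, pv_words_spacefree buf h]
  | cons ch rest ih =>
    intro acc buf h
    rw [List.foldl_cons, List.flatMap_cons]
    have hlit : ".,!?()".toList = ['.', ',', '!', '?', '(', ')'] := by decide
    by_cases hs : PySem.Chars.isspace ch = true
    · rw [show wltStep (acc, buf) ch = (wltFlush acc buf, []) from by simp [wltStep, hs]]
      rw [ih _ [] (by simp), pv_pvF_space ch hs]
      rw [List.nil_append, show buf ++ ([ch] ++ rest.flatMap pvF)
            = buf ++ ch :: rest.flatMap pvF from by simp, pv_words_flush buf ch _ h hs]
      rw [pv_flush_eq, List.map_append, List.append_assoc]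
    · rw [Bool.not_eq_true] at hs
      by_cases hm : ch ∈ ['.', ',', '!', '?', '(', ')']
      · rw [show wltStep (acc, buf) ch = (wltFlush acc buf ++ [String.ofList [ch]], []) from by
          simp only [wltStep, hs, Bool.false_eq_true, if_false, hlit, hm, if_pos]]
        rw [ih _ [] (by simp), pv_pvF_punct ch hm]
        rw [List.nil_append, show buf ++ ([' ', ch, ' '] ++ rest.flatMap pvF)
              = buf ++ ' ' :: (ch :: ' ' :: rest.flatMap pvF) from by simp]
        rw [pv_words_flush buf ' ' _ h (by decide), pv_words_punct ch _ hs]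
        rw [pv_flush_eq]
        simp
      · by_cases hq : ch = '\''
        · subst hq
          rw [show wltStep (acc, buf) '\'' = (wltFlush acc buf, ['\'']) from by
            simp [wltStep, hs, hlit, hm]]
          rw [ih _ ['\''] (by intro c hc; simp at hc; subst hc; decide)]
          rw [show pvF '\'' = [' ', '\''] from by decide]
          rw [show buf ++ ([' ', '\''] ++ rest.flatMap pvF)
                = buf ++ ' ' :: ('\'' :: rest.flatMap pvF) from by simp]
          rw [pv_words_flush buf ' ' _ h (by decide), pv_flush_eq]
          simp
        · rw [show wltStep (acc, buf) ch = (acc, buf ++ [ch]) from by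
            simp [wltStep, hs, hlit, hm, hq]]
          have h' : ∀ c ∈ buf ++ [ch], PySem.Chars.isspace c = false := by
            intro c hc
            rcases List.mem_append.mp hc with hc | hc
            · exact h c hc
            · simp at hc; subst hc; exact hs
          rw [ih _ _ h', pv_pvF_plain ch hq hm]
          simp

theorem pv_B_eq (text : String) :
    wordLevel_tokenizer_alt text = (pvWords (text.toList.flatMap pvF)).map String.ofList := by
  have := pv_scan text.toList [] [] (by simp)
  simpa [wordLevel_tokenizer_alt] using this

-- ===== VERDICT (by name: the statement is the Claim_ definition above) =====
theorem wordLevel_tokenizer_spec : Claim_equal_wordLevel_tokenizer := by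
  intro text _
  unfold Spec_wordLevel_tokenizer
  rw [pv_A_eq, pv_B_eq]
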